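-- pv_equiv track=rewrite | github.com/2lambda123/olcf-olcf-user-docs | conf.py | mk_tbl
-- ===== SOURCE A (Python) =====
-- def mk_tbl(tbl, hdrs):
--     ''' Create a text table from the dictionary.
--
--         tbl  : {str:[str]} = a mapping of column headers to lists of entries
--         hdrs : [str] = a selection of columns you would like to pull from tbl
--
--         returns a string containing the grid-formatted table
--     '''
--     cols = [[h.title()] + tbl[h] for h in hdrs] # select cols
--     widths = [max(map(len, col)) for col in cols]
--     brk = '+-' + '-+-'.join(['-'*w for w in widths]) + '-+'
--     lines = [brk]
--     for i in range(len(cols[0])):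
--         lines.append('| ' + ' | '.join(
--                    '{0: <{1}}'.format(c[i], w)
--                       for w, c in zip(widths,cols)) + ' |')
--         if i == 0:
--             lines.append('+=' + '=+='.join(['='*w for w in widths]) + '=+')
--         else:
--             lines.append(brk)
--     return '\n'.join(lines) + '\n'
-- ===== SOURCE B (Python) =====
-- def mk_tbl(tbl, hdrs):
--     ''' Create a text table from the dictionary (grid format).
--
--         Column-major rendering: each selected column is rendered independently as a
--         vertical strip of line segments (its own border/cell pieces); the final table
--         is the horizontal concatenation of these strips plus a closing edge.
--     '''
--     strips = []
--     for h in hdrs: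
--         col = [h.title()] + tbl[h]
--         w = max(len(s) for s in col)
--         strip = ['+' + '-' * (w + 2),
--                  '| ' + col[0] + ' ' * (w - len(col[0]) + 1),
--                  '+' + '=' * (w + 2)]
--         for cell in col[1:]:
--             strip.append('| ' + cell + ' ' * (w - len(cell) + 1))
--             strip.append('+' + '-' * (w + 2))
--         strips.append(strip)
--     edge = ['+' if k % 2 == 0 else '|' for k in range(len(strips[0]))]
--     return ''.join(''.join(segs) + '\n' for segs in zip(*strips, edge))
-- ===== Notes on version B (the rewrite author's own statement) =====
-- stated objective: alternative
-- what changed: B renders column-major: each selected column is turned independently into a vertical strip of border/cell segments (header segment and '='-separator emitted per column), and the table is the horizontal concatenation of the strips plus a closing edge via zip(*strips, edge), instead of A's row-major index loop with an i==0 branch joining cells across columns per line.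
import Mathlib
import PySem

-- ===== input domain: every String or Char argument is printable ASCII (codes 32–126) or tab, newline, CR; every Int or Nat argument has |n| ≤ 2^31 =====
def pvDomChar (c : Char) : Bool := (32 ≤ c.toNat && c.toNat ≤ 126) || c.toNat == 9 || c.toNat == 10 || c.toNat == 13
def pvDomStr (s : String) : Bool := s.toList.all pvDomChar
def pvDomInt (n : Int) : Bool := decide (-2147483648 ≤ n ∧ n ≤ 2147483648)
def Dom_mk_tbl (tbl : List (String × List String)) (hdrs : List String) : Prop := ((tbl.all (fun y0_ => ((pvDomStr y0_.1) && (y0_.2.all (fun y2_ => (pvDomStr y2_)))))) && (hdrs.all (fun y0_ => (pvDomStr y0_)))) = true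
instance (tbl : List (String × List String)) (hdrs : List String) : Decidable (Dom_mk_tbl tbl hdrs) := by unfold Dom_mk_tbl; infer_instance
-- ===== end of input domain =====

-- B renders the table column-major (independent vertical strips per column, horizontally
-- concatenated) instead of A's row-major index loop; equal RETURN value on Pre_ below.

-- ===== PORT A =====
-- str.title() for the ASCII domain: a letter after a non-letter is uppercased, after a letter lowercased
def pyTitleGo : List Char → Bool → List Char
  | [], _ => []
  | c :: rest, prevAlpha =>
    if c.isAlpha then (if prevAlpha then c.toLower else c.toUpper) :: pyTitleGo rest true
    else c :: pyTitleGo rest false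

def pyTitle (s : String) : List Char := pyTitleGo s.toList false

-- '{0: <{1}}'.format(s, w): pad on the right with spaces to width w (no truncation)
def padTo (cs : List Char) (w : Nat) : List Char := cs ++ List.replicate (w - cs.length) ' '

def mk_tbl (tbl : List (String × List String)) (hdrs : List String) : String :=
  let cols : List (List (List Char)) :=
    hdrs.map (fun h => pyTitle h :: (((PySem.Dict.mk tbl).get? h).getD []).map String.toList)
  let widths : List Nat := cols.map (fun col => (PySem.List.max? (col.map List.length) (fun x => x)).getD 0)
  let brk : List Char := ['+', '-'] ++ PySem.Chars.join ['-', '+', '-'] (widths.map (fun w => List.replicate w '-')) ++ ['-', '+']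
  let lines : List (List Char) :=
    (List.range (cols.headD []).length).foldl (fun acc i =>
      let row : List Char := ['|', ' '] ++ PySem.Chars.join [' ', '|', ' ']
          ((widths.zip cols).map (fun wc => padTo (wc.2.getD i []) wc.1)) ++ [' ', '|']
      acc ++ [row, if i = 0 then
          ['+', '='] ++ PySem.Chars.join ['=', '+', '='] (widths.map (fun w => List.replicate w '=')) ++ ['=', '+']
        else brk]) [brk]
  String.mk (PySem.Chars.join ['\n'] lines ++ ['\n'])

-- ===== PORT B =====
-- '+' + ch*(w+2)
def brkSeg (w : Nat) (ch : Char) : List Char := '+' :: List.replicate (w + 2) ch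
-- '| ' + cell + ' '*(w - len(cell) + 1)
def cellSeg (w : Nat) (cs : List Char) : List Char :=
  ['|', ' '] ++ cs ++ List.replicate (w - cs.length + 1) ' '

-- one column rendered as a vertical strip of segments (col is never empty: col[0] is the
-- title, so headD's default is unreachable)
def stripOf (w : Nat) (col : List (List Char)) : List (List Char) :=
  [brkSeg w '-', cellSeg w (col.headD []), brkSeg w '='] ++
    col.tail.flatMap (fun c => [cellSeg w c, brkSeg w '-'])

-- zip(*strips, edge): truncating transpose, stops as soon as any list is exhausted
def zipStar (cols : List (List (List Char))) : List (List (List Char)) :=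
  if h : cols.isEmpty || cols.any List.isEmpty then []
  else (cols.map (fun c => c.headD [])) :: zipStar (cols.map List.tail)
termination_by (cols.headD []).length
decreasing_by
  simp only [Bool.or_eq_true, List.any_eq_true, not_or, not_exists] at h
  obtain ⟨h1, h2⟩ := h
  cases cols with
  | nil => exact absurd rfl h1
  | cons c rest =>
    have hc : c ≠ [] := by
      intro hn; subst hn; exact h2 [] ⟨by simp, rfl⟩
    cases c with
    | nil => exact absurd rfl hc
    | cons a as => simp

def mk_tbl_alt (tbl : List (String × List String)) (hdrs : List String) : String :=
  let strips : List (List (List Char)) :=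
    hdrs.map (fun h =>
      let col := pyTitle h :: (((PySem.Dict.mk tbl).get? h).getD []).map String.toList
      stripOf ((PySem.List.max? (col.map List.length) (fun x => x)).getD 0) col)
  let edge : List (List Char) :=
    (List.range (strips.headD []).length).map (fun k => if k % 2 = 0 then ['+'] else ['|'])
  String.mk (((zipStar (strips ++ [edge])).map (fun segs => segs.flatten ++ ['\n'])).flatten)

-- ===== PRECONDITION & SPEC =====
-- Pre_ = exactly the inputs where A returns: hdrs nonempty (cols[0] is indexed), every header a key
-- of tbl (tbl[h]), and no selected column shorter than the first one (c[i] for i < len(cols[0])).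
def Pre_mk_tbl (tbl : List (String × List String)) (hdrs : List String) : Prop :=
  hdrs ≠ [] ∧ ∀ h ∈ hdrs,
    ((PySem.Dict.mk tbl).get? h).isSome = true ∧
    (((PySem.Dict.mk tbl).get? (hdrs.headD "")).getD []).length ≤ (((PySem.Dict.mk tbl).get? h).getD []).length
instance (tbl : List (String × List String)) (hdrs : List String) : Decidable (Pre_mk_tbl tbl hdrs) := by
  unfold Pre_mk_tbl; infer_instance

def pvWitness_mk_tbl : (List (String × List String)) × List String :=
  ([("os", ["linux", "mac"]), ("cpu", ["x86", "arm"])], ["os", "cpu"])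

def Spec_mk_tbl (tbl : List (String × List String)) (hdrs : List String) (out : String) : Prop := out = mk_tbl_alt tbl hdrs
instance (tbl : List (String × List String)) (hdrs : List String) (out : String) : Decidable (Spec_mk_tbl tbl hdrs out) := by unfold Spec_mk_tbl; infer_instance

-- ===== CLAIM (what is proved, stated in full; the proofs are below) =====
def Claim_equal_mk_tbl : Prop := ∀ (tbl : List (String × List String)) (hdrs : List String), Dom_mk_tbl tbl hdrs → Pre_mk_tbl tbl hdrs → Spec_mk_tbl tbl hdrs (mk_tbl tbl hdrs)
-- ===== LEMMAS AND PROOFS =====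

-- width of a column, as both ports compute it
def Wd (c : List (List Char)) : Nat := (PySem.List.max? (c.map List.length) (fun x => x)).getD 0

theorem getD_tail (c : List (List Char)) (i : Nat) : c.tail.getD i [] = c.getD (i + 1) [] := by
  cases c <;> simp [List.getD]

theorem headD_eq_getD_zero (c : List (List Char)) : c.headD [] = c.getD 0 [] := by
  cases c <;> simp [List.getD]

-- zip(*…) row-by-row characterisation when no list is shorter than the first
theorem zipStar_eq (n : Nat) (cols : List (List (List Char))) (h0 : cols ≠ [])
    (hn : (cols.headD []).length = n) (hmin : ∀ c ∈ cols, n ≤ c.length) :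
    zipStar cols = (List.range n).map (fun i => cols.map (fun c => c.getD i [])) := by
  induction n generalizing cols with
  | zero =>
    rw [zipStar]
    have : cols.any List.isEmpty = true := by
      cases cols with
      | nil => exact absurd rfl h0
      | cons c rest =>
        simp only [List.headD_cons] at hn
        simp [List.any_cons, List.eq_nil_of_length_eq_zero hn]
    simp [this]
  | succ m ih =>
    have hne : ∀ c ∈ cols, c ≠ [] := by
      intro c hc hnil
      have := hmin c hc
      simp [hnil] at this
    rw [zipStar]
    have hcond : (cols.isEmpty || cols.any List.isEmpty) = false := by
      simp only [Bool.or_eq_false_iff, List.isEmpty_eq_false_iff, List.any_eq_false]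
      exact ⟨h0, fun c hc => by simpa [List.isEmpty_iff] using hne c hc⟩
    rw [dif_neg (by simp [hcond])]
    have h0' : cols.map List.tail ≠ [] := by
      cases cols with
      | nil => exact absurd rfl h0
      | cons c rest => simp
    have hn' : ((cols.map List.tail).headD []).length = m := by
      cases cols with
      | nil => exact absurd rfl h0
      | cons c rest =>
        simp only [List.map_cons, List.headD_cons] at *
        cases c with
        | nil => simp at hn
        | cons a as => simpa using Nat.succ_injective hn
    have hmin' : ∀ c ∈ cols.map List.tail, m ≤ c.length := by
      intro t ht
      obtain ⟨c, hc, rfl⟩ := List.mem_map.mp ht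
      have := hmin c hc
      cases c with
      | nil => exact absurd rfl (hne _ hc)
      | cons a as => simpa using Nat.le_of_succ_le_succ (by simpa using this)
    rw [ih (cols.map List.tail) h0' hn' hmin']
    rw [List.range_succ_eq_map]
    simp only [List.map_cons, List.map_map, Function.comp_def]
    congr 1
    · exact List.map_congr_left fun c _ => headD_eq_getD_zero c
    · exact List.map_congr_left fun i _ =>
        List.map_congr_left fun c _ => getD_tail c i

theorem rep_two (ch : Char) (w : Nat) :
    List.replicate (w + 2) ch = ch :: (List.replicate w ch ++ [ch]) := by
  rw [show w + 2 = (w + 1) + 1 from rfl, List.replicate_succ, List.replicate_succ']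

theorem flatten_map {a b : Type} (l : List a) (g : a → List b) : (l.map g).flatten = l.flatMap g := by
  induction l with
  | nil => simp
  | cons x xs ih => simp [ih]

theorem join_nl (a : List Char) (ls : List (List Char)) :
    PySem.Chars.join ['\n'] (a :: ls) ++ ['\n'] = (a :: ls).flatMap (fun l => l ++ ['\n']) := by
  induction ls generalizing a with
  | nil => simp [PySem.Chars.join_singleton]
  | cons b bs ih =>
    rw [PySem.Chars.join_cons_cons]
    simp only [List.flatMap_cons] at *
    rw [← ih b]
    simp [List.append_assoc]

theorem pairs_length (t : List (List Char)) (f g : List Char → List Char) :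
    (t.flatMap (fun c => [f c, g c])).length = 2 * t.length := by
  induction t with
  | nil => simp
  | cons x xs ih => simp [ih]; omega

theorem length_stripOf (w : Nat) (x : List Char) (t : List (List Char)) :
    (stripOf w (x :: t)).length = 2 * t.length + 3 := by
  simp [stripOf, pairs_length (f := fun c => cellSeg w c) (g := fun _ => brkSeg w '-')]

theorem pairs_getD_fst (t : List (List Char)) (f g : List Char → List Char) (j : Nat)
    (hj : j < t.length) :
    (t.flatMap (fun c => [f c, g c])).getD (2 * j) [] = f (t.getD j []) := by
  induction t generalizing j with
  | nil => simp at hj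
  | cons x xs ih =>
    cases j with
    | zero => simp [List.getD]
    | succ m =>
      rw [show 2 * (m + 1) = (2 * m + 1) + 1 from by ring]
      simpa [List.flatMap_cons, List.getD_cons_succ] using ih m (by simpa using hj)

theorem pairs_getD_snd (t : List (List Char)) (f g : List Char → List Char) (j : Nat)
    (hj : j < t.length) :
    (t.flatMap (fun c => [f c, g c])).getD (2 * j + 1) [] = g (t.getD j []) := by
  induction t generalizing j with
  | nil => simp at hj
  | cons x xs ih =>
    cases j with
    | zero => simp [List.getD]
    | succ m =>
      rw [show 2 * (m + 1) + 1 = ((2 * m + 1) + 1) + 1 from by ring]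
      simpa [List.flatMap_cons, List.getD_cons_succ] using ih m (by simpa using hj)

theorem stripOf_getD_zero (w : Nat) (c : List (List Char)) :
    (stripOf w c).getD 0 [] = brkSeg w '-' := by
  simp [stripOf, List.getD]

theorem stripOf_getD_row (w : Nat) (x : List Char) (t : List (List Char)) (i : Nat)
    (hi : i < t.length + 1) :
    (stripOf w (x :: t)).getD (2 * i + 1) [] = cellSeg w ((x :: t).getD i []) := by
  cases i with
  | zero => simp [stripOf, List.getD]
  | succ j =>
    rw [show 2 * (j + 1) + 1 = ((2 * j + 1) + 1) + 1 from by ring]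
    simpa [stripOf, List.getD_cons_succ] using
      pairs_getD_fst t (fun c => cellSeg w c) (fun _ => brkSeg w '-') j (by omega)

theorem stripOf_getD_sep (w : Nat) (x : List Char) (t : List (List Char)) (i : Nat)
    (hi : i < t.length + 1) :
    (stripOf w (x :: t)).getD (2 * i + 2) [] = brkSeg w (if i = 0 then '=' else '-') := by
  cases i with
  | zero => simp [stripOf, List.getD]
  | succ j =>
    rw [show 2 * (j + 1) + 2 = (((2 * j + 1) + 1) + 1) + 1 from by ring]
    simpa [stripOf, List.getD_cons_succ] using
      pairs_getD_snd t (fun c => cellSeg w c) (fun _ => brkSeg w '-') j (by omega)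

theorem getD_map_range (m k : Nat) (g : Nat → List Char) (hk : k < m) :
    ((List.range m).map g).getD k [] = g k := by
  simp [List.getD, List.getElem?_map, List.getElem?_range, hk]

theorem range_odd_even (n : Nat) (f : Nat → List Char) :
    (List.range (2 * n + 1)).map f
      = f 0 :: (List.range n).flatMap (fun i => [f (2 * i + 1), f (2 * i + 2)]) := by
  induction n with
  | zero => simp
  | succ m ih =>
    rw [show 2 * (m + 1) + 1 = ((2 * m + 1) + 1) + 1 from by ring,
      List.range_succ, List.range_succ, List.map_append, List.map_append, ih,
      List.range_succ, List.flatMap_append]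
    simp [List.append_assoc]

theorem zip_self_map (cols : List (List (List Char))) (W : List (List Char) → Nat) :
    (cols.map W).zip cols = cols.map (fun c => (W c, c)) := by
  induction cols with
  | nil => simp
  | cons c cs ih => simp [ih]

theorem flatten_brk (ch : Char) (W : List (List Char) → Nat) (c0 : List (List Char))
    (cs : List (List (List Char))) :
    ((c0 :: cs).map (fun c => brkSeg (W c) ch)).flatten ++ ['+']
      = ['+', ch] ++ PySem.Chars.join [ch, '+', ch] (((c0 :: cs).map W).map (fun w => List.replicate w ch)) ++ [ch, '+'] := by
  induction cs generalizing c0 with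
  | nil => simp [brkSeg, rep_two, PySem.Chars.join_singleton]
  | cons c1 cs ih =>
    simp only [List.map_cons, List.flatten_cons] at *
    rw [List.append_assoc, ih c1, PySem.Chars.join_cons_cons]
    simp [brkSeg, rep_two, List.append_assoc]

theorem cellSeg_eq (w : Nat) (cs : List Char) :
    cellSeg w cs = ['|', ' '] ++ padTo cs w ++ [' '] := by
  simp [cellSeg, padTo, List.replicate_succ', List.append_assoc]

theorem flatten_row (i : Nat) (W : List (List Char) → Nat) (c0 : List (List Char))
    (cs : List (List (List Char))) :
    ((c0 :: cs).map (fun c => cellSeg (W c) (c.getD i []))).flatten ++ ['|']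
      = ['|', ' '] ++ PySem.Chars.join [' ', '|', ' ']
          ((c0 :: cs).map (fun c => padTo (c.getD i []) (W c))) ++ [' ', '|'] := by
  induction cs generalizing c0 with
  | nil => simp [cellSeg_eq, PySem.Chars.join_singleton, List.append_assoc]
  | cons c1 cs ih =>
    simp only [List.map_cons, List.flatten_cons] at *
    rw [List.append_assoc, ih c1, PySem.Chars.join_cons_cons, cellSeg_eq]
    simp [List.append_assoc]

-- the whole equivalence, generalised over the nonempty column list: A's row-major line
-- loop emits exactly the horizontal concatenation of B's column strips
theorem core (x0 : List Char) (t0 : List (List Char)) (cs : List (List (List Char)))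
    (hne : ∀ c ∈ cs, c ≠ [])
    (hmin : ∀ c ∈ (x0 :: t0) :: cs, t0.length + 1 ≤ c.length) :
    PySem.Chars.join ['\n']
      (List.foldl (fun acc i =>
        acc ++ [['|', ' '] ++ PySem.Chars.join [' ', '|', ' ']
            (((((x0 :: t0) :: cs).map Wd).zip ((x0 :: t0) :: cs)).map (fun wc => padTo (wc.2.getD i []) wc.1)) ++ [' ', '|'],
          if i = 0 then
            ['+', '='] ++ PySem.Chars.join ['=', '+', '='] ((((x0 :: t0) :: cs).map Wd).map (fun w => List.replicate w '=')) ++ ['=', '+']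
          else
            ['+', '-'] ++ PySem.Chars.join ['-', '+', '-'] ((((x0 :: t0) :: cs).map Wd).map (fun w => List.replicate w '-')) ++ ['-', '+']])
        [['+', '-'] ++ PySem.Chars.join ['-', '+', '-'] ((((x0 :: t0) :: cs).map Wd).map (fun w => List.replicate w '-')) ++ ['-', '+']]
        (List.range (t0.length + 1))) ++ ['\n']
    = ((zipStar ((((x0 :: t0) :: cs).map (fun c => stripOf (Wd c) c)) ++
          [(List.range (((((x0 :: t0) :: cs).map (fun c => stripOf (Wd c) c)).headD []).length)).map
            (fun k => if k % 2 = 0 then ['+'] else ['|'])])).map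
        (fun segs => segs.flatten ++ ['\n'])).flatten := by
  have hL : (((((x0 :: t0) :: cs).map (fun c => stripOf (Wd c) c))).headD []).length
      = 2 * (t0.length + 1) + 1 := by
    simp only [List.map_cons, List.headD_cons, length_stripOf]; omega
  rw [hL]
  rw [zipStar_eq (2 * (t0.length + 1) + 1) _ (by simp) ?hn ?hmin]
  case hmin =>
    intro s hs
    rcases List.mem_append.mp hs with hs | hs
    · obtain ⟨c, hc, rfl⟩ := List.mem_map.mp hs
      have hcl := hmin c hc
      have hcne : c ≠ [] := by
        rcases List.mem_cons.mp hc with rfl | hc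
        · simp
        · exact hne c hc
      cases c with
      | nil => exact absurd rfl hcne
      | cons y ys =>
        rw [length_stripOf]
        simp only [List.length_cons] at hcl
        omega
    · simp only [List.mem_singleton] at hs
      subst hs
      simp
  case hn =>
    simp only [List.map_cons, List.cons_append, List.headD_cons, length_stripOf]; omega
  -- per-line computations
  have hbrk : (((((x0 :: t0) :: cs).map (fun c => stripOf (Wd c) c)) ++ [(List.range (2 * (t0.length + 1) + 1)).map (fun k => if k % 2 = 0 then ['+'] else ['|'])]).map (fun c => c.getD (0) [])).flatten
      = ['+', '-'] ++ PySem.Chars.join ['-', '+', '-'] ((((x0 :: t0) :: cs).map Wd).map (fun w => List.replicate w '-')) ++ ['-', '+'] := by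
    rw [List.map_append, List.flatten_append, List.map_map,
      List.map_singleton, List.flatten_cons, List.flatten_nil, List.append_nil]
    rw [getD_map_range _ 0 _ (by omega), if_pos (by omega)]
    have e : ((x0 :: t0) :: cs).map ((fun c : List (List Char) => c.getD 0 []) ∘ (fun c => stripOf (Wd c) c))
        = ((x0 :: t0) :: cs).map (fun c => brkSeg (Wd c) '-') :=
      List.map_congr_left fun c _ => stripOf_getD_zero (Wd c) c
    rw [e]
    exact flatten_brk '-' Wd (x0 :: t0) cs
  have hgetrow : ∀ i, i < t0.length + 1 →
      ((x0 :: t0) :: cs).map ((fun c : List (List Char) => c.getD (2 * i + 1) []) ∘ (fun c => stripOf (Wd c) c))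
        = ((x0 :: t0) :: cs).map (fun c => cellSeg (Wd c) (c.getD i [])) := by
    intro i hi
    refine List.map_congr_left fun c hc => ?_
    have hcl := hmin c hc
    have hcne : c ≠ [] := by
      rcases List.mem_cons.mp hc with rfl | hc
      · simp
      · exact hne c hc
    cases c with
    | nil => exact absurd rfl hcne
    | cons y ys =>
      refine stripOf_getD_row (Wd (y :: ys)) y ys i ?_
      simp only [List.length_cons] at hcl
      omega
  have hgetsep : ∀ i, i < t0.length + 1 →
      ((x0 :: t0) :: cs).map ((fun c : List (List Char) => c.getD (2 * i + 2) []) ∘ (fun c => stripOf (Wd c) c))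
        = ((x0 :: t0) :: cs).map (fun c => brkSeg (Wd c) (if i = 0 then '=' else '-')) := by
    intro i hi
    refine List.map_congr_left fun c hc => ?_
    have hcl := hmin c hc
    have hcne : c ≠ [] := by
      rcases List.mem_cons.mp hc with rfl | hc
      · simp
      · exact hne c hc
    cases c with
    | nil => exact absurd rfl hcne
    | cons y ys =>
      refine stripOf_getD_sep (Wd (y :: ys)) y ys i ?_
      simp only [List.length_cons] at hcl
      omega
  have hrow : ∀ i, i < t0.length + 1 →
      (((((x0 :: t0) :: cs).map (fun c => stripOf (Wd c) c)) ++ [(List.range (2 * (t0.length + 1) + 1)).map (fun k => if k % 2 = 0 then ['+'] else ['|'])]).map (fun c => c.getD (2 * i + 1) [])).flatten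
        = ['|', ' '] ++ PySem.Chars.join [' ', '|', ' '] ((((((x0 :: t0) :: cs).map Wd)).zip ((x0 :: t0) :: cs)).map (fun wc => padTo (wc.2.getD i []) wc.1)) ++ [' ', '|'] := by
    intro i hi
    rw [List.map_append, List.flatten_append, List.map_map,
      List.map_singleton, List.flatten_cons, List.flatten_nil, List.append_nil]
    rw [getD_map_range _ _ _ (by omega), if_neg (by omega)]
    rw [hgetrow i hi]
    rw [zip_self_map, List.map_map]
    have e2 : ((x0 :: t0) :: cs).map ((fun wc : Nat × List (List Char) => padTo (wc.2.getD i []) wc.1) ∘ (fun c => (Wd c, c)))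
        = ((x0 :: t0) :: cs).map (fun c => padTo (c.getD i []) (Wd c)) :=
      List.map_congr_left fun c _ => rfl
    rw [e2]
    exact flatten_row i Wd (x0 :: t0) cs
  have hsep : ∀ i, i < t0.length + 1 →
      (((((x0 :: t0) :: cs).map (fun c => stripOf (Wd c) c)) ++ [(List.range (2 * (t0.length + 1) + 1)).map (fun k => if k % 2 = 0 then ['+'] else ['|'])]).map (fun c => c.getD (2 * i + 2) [])).flatten
        = (if i = 0 then ['+', '='] ++ PySem.Chars.join ['=', '+', '='] ((((x0 :: t0) :: cs).map Wd).map (fun w => List.replicate w '=')) ++ ['=', '+'] else ['+', '-'] ++ PySem.Chars.join ['-', '+', '-'] ((((x0 :: t0) :: cs).map Wd).map (fun w => List.replicate w '-')) ++ ['-', '+']) := by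
    intro i hi
    rw [List.map_append, List.flatten_append, List.map_map,
      List.map_singleton, List.flatten_cons, List.flatten_nil, List.append_nil]
    rw [getD_map_range _ _ _ (by omega), if_pos (by omega)]
    rw [hgetsep i hi]
    by_cases h0 : i = 0
    · simp only [if_pos h0]
      exact flatten_brk '=' Wd (x0 :: t0) cs
    · simp only [if_neg h0]
      exact flatten_brk '-' Wd (x0 :: t0) cs
  -- assemble
  have key : (['+', '-'] ++ PySem.Chars.join ['-', '+', '-'] ((((x0 :: t0) :: cs).map Wd).map (fun w => List.replicate w '-')) ++ ['-', '+']) ::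
      (List.range (t0.length + 1)).flatMap (fun i =>
        [['|', ' '] ++ PySem.Chars.join [' ', '|', ' '] ((((((x0 :: t0) :: cs).map Wd)).zip ((x0 :: t0) :: cs)).map (fun wc => padTo (wc.2.getD i []) wc.1)) ++ [' ', '|'],
          if i = 0 then ['+', '='] ++ PySem.Chars.join ['=', '+', '='] ((((x0 :: t0) :: cs).map Wd).map (fun w => List.replicate w '=')) ++ ['=', '+'] else ['+', '-'] ++ PySem.Chars.join ['-', '+', '-'] ((((x0 :: t0) :: cs).map Wd).map (fun w => List.replicate w '-')) ++ ['-', '+']])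
      = (List.range (2 * (t0.length + 1) + 1)).map (fun k =>
          (((((x0 :: t0) :: cs).map (fun c => stripOf (Wd c) c)) ++ [(List.range (2 * (t0.length + 1) + 1)).map (fun k => if k % 2 = 0 then ['+'] else ['|'])]).map (fun c => c.getD k [])).flatten) := by
    rw [range_odd_even]
    congr 1
    · exact hbrk.symm
    · rw [← flatten_map, ← flatten_map]
      congr 1
      refine List.map_congr_left fun i hi => ?_
      rw [List.mem_range] at hi
      rw [← hrow i hi, ← hsep i hi]
  rw [PySem.List.foldl_append_eq_flatMap, List.singleton_append, join_nl, key, ← flatten_map,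
    List.map_map, List.map_map]
  rfl

theorem mk_tbl_spec : Claim_equal_mk_tbl := by
  intro tbl hdrs _ hpre
  obtain ⟨hne0, hall⟩ := hpre
  cases hdrs with
  | nil => exact absurd rfl hne0
  | cons h0 hs =>
    show String.mk (PySem.Chars.join ['\n']
        (List.foldl (fun acc i =>
          acc ++ [['|', ' '] ++ PySem.Chars.join [' ', '|', ' '] (((((pyTitle h0 :: ((((PySem.Dict.mk tbl).get? h0).getD []).map String.toList)) :: hs.map (fun h => pyTitle h :: (((PySem.Dict.mk tbl).get? h).getD []).map String.toList)).map Wd).zip ((pyTitle h0 :: ((((PySem.Dict.mk tbl).get? h0).getD []).map String.toList)) :: hs.map (fun h => pyTitle h :: (((PySem.Dict.mk tbl).get? h).getD []).map String.toList))).map (fun wc => padTo (wc.2.getD i []) wc.1)) ++ [' ', '|'],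
            if i = 0 then ['+', '='] ++ PySem.Chars.join ['=', '+', '='] ((((pyTitle h0 :: ((((PySem.Dict.mk tbl).get? h0).getD []).map String.toList)) :: hs.map (fun h => pyTitle h :: (((PySem.Dict.mk tbl).get? h).getD []).map String.toList)).map Wd).map (fun w => List.replicate w '=')) ++ ['=', '+'] else ['+', '-'] ++ PySem.Chars.join ['-', '+', '-'] ((((pyTitle h0 :: ((((PySem.Dict.mk tbl).get? h0).getD []).map String.toList)) :: hs.map (fun h => pyTitle h :: (((PySem.Dict.mk tbl).get? h).getD []).map String.toList)).map Wd).map (fun w => List.replicate w '-')) ++ ['-', '+']])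
          [['+', '-'] ++ PySem.Chars.join ['-', '+', '-'] ((((pyTitle h0 :: ((((PySem.Dict.mk tbl).get? h0).getD []).map String.toList)) :: hs.map (fun h => pyTitle h :: (((PySem.Dict.mk tbl).get? h).getD []).map String.toList)).map Wd).map (fun w => List.replicate w '-')) ++ ['-', '+']]
          (List.range (((((PySem.Dict.mk tbl).get? h0).getD []).map String.toList).length + 1))) ++ ['\n'])
      = String.mk (((zipStar (((h0 :: hs).map (fun h => stripOf (Wd (pyTitle h :: (((PySem.Dict.mk tbl).get? h).getD []).map String.toList)) (pyTitle h :: (((PySem.Dict.mk tbl).get? h).getD []).map String.toList))) ++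
          [(List.range ((((h0 :: hs).map (fun h => stripOf (Wd (pyTitle h :: (((PySem.Dict.mk tbl).get? h).getD []).map String.toList)) (pyTitle h :: (((PySem.Dict.mk tbl).get? h).getD []).map String.toList))).headD []).length)).map (fun k => if k % 2 = 0 then ['+'] else ['|'])])).map
            (fun segs => segs.flatten ++ ['\n'])).flatten)
    have hm : ((h0 :: hs).map (fun h => stripOf (Wd (pyTitle h :: (((PySem.Dict.mk tbl).get? h).getD []).map String.toList)) (pyTitle h :: (((PySem.Dict.mk tbl).get? h).getD []).map String.toList)))
        = ((h0 :: hs).map (fun h => pyTitle h :: (((PySem.Dict.mk tbl).get? h).getD []).map String.toList)).map (fun c => stripOf (Wd c) c) := by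
      rw [List.map_map]; rfl
    rw [hm]
    refine congrArg String.mk (core (pyTitle h0) ((((PySem.Dict.mk tbl).get? h0).getD []).map String.toList) (hs.map (fun h => pyTitle h :: (((PySem.Dict.mk tbl).get? h).getD []).map String.toList)) ?_ ?_)
    · intro c hc
      obtain ⟨h, _, rfl⟩ := List.mem_map.mp hc
      simp
    · intro c hc
      rcases List.mem_cons.mp hc with rfl | hc
      · simp
      · obtain ⟨h, hh, rfl⟩ := List.mem_map.mp hc
        have := (hall h (List.mem_cons_of_mem _ hh)).2
        simp only [List.headD_cons] at this
        simp only [List.length_cons, List.length_map]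
        omega
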